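-- pv_equiv track=rewrite | github.com/bryandijkhuizen/FitnessData | lib/Input.py | _dedupe_columns
-- ===== SOURCE A (Python) =====
-- from typing import Any, Dict, List, Optional, Tuple
--
-- def _dedupe_columns(cols: List[str]) -> List[str]:
--     seen: dict[str, int] = {}
--     out: List[str] = []
--     for c in cols:
--         c = str(c)
--         if c not in seen:
--             seen[c] = 0
--             out.append(c)
--         else:
--             seen[c] += 1
--             out.append(f"{c}__{seen[c]}")
--     return out
-- ===== SOURCE B (Python) =====
-- from typing import List
--
-- def _dedupe_columns(cols: List[str]) -> List[str]:
--     names = [str(c) for c in cols]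
--     groups: dict = {}
--     for i, c in enumerate(names):
--         groups.setdefault(c, []).append(i)
--     out = [""] * len(names)
--     for name, idxs in groups.items():
--         for rank, i in enumerate(idxs):
--             out[i] = name if rank == 0 else f"{name}__{rank}"
--     return out
-- ===== Notes on version B (the rewrite author's own statement) =====
-- stated objective: alternative
-- what changed: Replaces A's single pass with a running seen-counter dict by an inverted position index: one pass groups each name's indices, then the output list is filled positionally per group, suffixing each occurrence with its rank.
import Mathlib
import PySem

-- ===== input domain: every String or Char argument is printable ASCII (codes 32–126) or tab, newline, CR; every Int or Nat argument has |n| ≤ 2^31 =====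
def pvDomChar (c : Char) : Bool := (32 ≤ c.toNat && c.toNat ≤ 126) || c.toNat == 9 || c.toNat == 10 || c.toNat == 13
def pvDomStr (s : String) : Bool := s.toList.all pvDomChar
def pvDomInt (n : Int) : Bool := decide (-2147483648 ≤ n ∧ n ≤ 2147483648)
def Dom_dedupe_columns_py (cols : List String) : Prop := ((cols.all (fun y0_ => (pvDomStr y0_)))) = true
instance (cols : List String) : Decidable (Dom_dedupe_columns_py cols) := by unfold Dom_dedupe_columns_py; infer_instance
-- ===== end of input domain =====

-- B replaces A's running seen-counter dict by an inverted position index (name → indices),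
-- filling the output positionally per group (alternative decomposition, same cost).

-- ===== PORT A =====
-- literal transliteration of A: fold over cols carrying (seen dict, out list);
-- str(c) on a str is the identity and is ported as such.
def dedupe_columns_py (cols : List String) : List String :=
  (cols.foldl
    (fun (st : PySem.Dict String Int × List String) c =>
      match st.1.get? c with
      | none => (st.1.insert c 0, st.2 ++ [c])                 -- c not in seen
      | some k => (st.1.insert c (k + 1),                      -- seen[c] += 1
          st.2 ++ [c ++ "__" ++ PySem.Int.toStr (k + 1)]))     -- f"{c}__{seen[c]}"
    (PySem.Dict.empty, [])).2

-- ===== PORT B =====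
-- literal transliteration of B: group each name's indices in one pass
-- (groups.setdefault(c, []).append(i) ≡ modify c [] (· ++ [i])), then fill the
-- output list positionally per group.  [""] * len(names) ports Python's
-- [None] * len(names) placeholder list (every cell is assigned before return,
-- so the placeholder value never appears in the result); out[i] = … is pySetD
-- (every written index comes from enumerate, hence is in range, where Python
-- cannot raise).
def dedupe_columns_py_alt (cols : List String) : List String :=
  let names := cols                                            -- [str(c) for c in cols] is the identity on List String
  let groups := (PySem.List.enumerate names 0).foldl
      (fun d ic => d.modify ic.2 [] (fun l => l ++ [ic.1])) PySem.Dict.empty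
  let out0 := PySem.List.pyRepeat [""] (PySem.List.len names)
  groups.items.foldl
    (fun out kv =>
      (PySem.List.enumerate kv.2 0).foldl
        (fun out ri =>
          PySem.List.pySetD out ri.2
            (if ri.1 == 0 then kv.1 else kv.1 ++ "__" ++ PySem.Int.toStr ri.1))
        out)
    out0

-- ===== PRECONDITION & SPEC =====
def Spec_dedupe_columns_py (cols : List String) (out : List String) : Prop := out = dedupe_columns_py_alt cols
instance (cols : List String) (out : List String) : Decidable (Spec_dedupe_columns_py cols out) := by unfold Spec_dedupe_columns_py; infer_instance

-- ===== CLAIM (what is proved, stated in full; the proofs are below) =====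
def Claim_equal_dedupe_columns_py : Prop := ∀ (cols : List String), Dom_dedupe_columns_py cols → Spec_dedupe_columns_py cols (dedupe_columns_py cols)

-- ===== LEMMAS AND PROOFS =====

-- common reference rendering: process l after an already-processed prefix p
def pvRender (p l : List String) : List String :=
  match l with
  | [] => []
  | c :: t =>
      (if p.count c = 0 then c else c ++ "__" ++ PySem.Int.toStr (p.count c : Int))
        :: pvRender (p ++ [c]) t

-- ===== A-side: the seen-dict loop computes pvRender =====
theorem pvA_loop (l p : List String) (seen : PySem.Dict String Int) (out : List String)
    (hinv : ∀ c, seen.get? c =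
      if p.count c = 0 then none else some ((p.count c : Int) - 1)) :
    (l.foldl
      (fun (st : PySem.Dict String Int × List String) c =>
        match st.1.get? c with
        | none => (st.1.insert c 0, st.2 ++ [c])
        | some k => (st.1.insert c (k + 1),
            st.2 ++ [c ++ "__" ++ PySem.Int.toStr (k + 1)]))
      (seen, out)).2 = out ++ pvRender p l := by
  induction l generalizing p seen out with
  | nil => simp [pvRender]
  | cons c t ih =>
    have hc := hinv c
    by_cases h0 : p.count c = 0
    · rw [if_pos h0] at hc
      simp only [List.foldl_cons, hc, pvRender, h0, reduceIte]
      rw [ih (p ++ [c]) _ (out ++ [c]) ?_]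
      · simp
      · intro c'
        by_cases hcc : c' = c
        · rw [hcc, PySem.Dict.get?_insert_self]
          simp [List.count_append, h0]
        · rw [PySem.Dict.get?_insert_of_ne _ _ hcc, hinv c']
          have h1 : List.count c' [c] = 0 := List.count_eq_zero.mpr (by simp [hcc])
          simp [List.count_append, h1]
    · rw [if_neg h0] at hc
      simp only [List.foldl_cons, hc, pvRender, if_neg h0]
      have hk : ((p.count c : Int) - 1) + 1 = (p.count c : Int) := by ring
      rw [hk]
      rw [ih (p ++ [c]) _ _ ?_]
      · simp
      · intro c'
        by_cases hcc : c' = c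
        · rw [hcc, PySem.Dict.get?_insert_self]
          rw [if_neg (by simp [List.count_append])]
          rw [Option.some_inj]
          have h2 : List.count c [c] = 1 := List.count_eq_one_of_mem (by simp) (by simp)
          simp only [List.count_append, h2]
          push_cast
          omega
        · rw [PySem.Dict.get?_insert_of_ne _ _ hcc, hinv c']
          have h1 : List.count c' [c] = 0 := List.count_eq_zero.mpr (by simp [hcc])
          simp [List.count_append, h1]

-- ===== B-side: names of the two phases =====
def pvGrp (xs : List String) : PySem.Dict String (List Int) :=
  (PySem.List.enumerate xs 0).foldl (fun d ic => d.modify ic.2 [] (fun l => l ++ [ic.1])) PySem.Dict.empty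

def pvVal (name : String) (rank : Int) : String :=
  if rank == 0 then name else name ++ "__" ++ PySem.Int.toStr rank

def pvFillG (o : List String) (kv : String × List Int) : List String :=
  (PySem.List.enumerate kv.2 0).foldl (fun o ri => PySem.List.pySetD o ri.2 (pvVal kv.1 ri.1)) o

def pvFill (items : List (String × List Int)) (o : List String) : List String :=
  items.foldl pvFillG o

theorem pvAlt_eq_fill (cols : List String) :
    dedupe_columns_py_alt cols = pvFill (pvGrp cols).items (List.replicate cols.length "") := by
  unfold dedupe_columns_py_alt pvFill pvFillG pvGrp pvVal
  simp [PySem.List.pyRepeat_singleton, PySem.List.len]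

-- positions of c in ys, as phase 1 collects them
def pvPos (ys : List String) (c : String) : List Int :=
  ((PySem.List.enumerate ys 0).filter (fun ic => ic.2 == c)).map (·.1)

theorem pvEnumAppend {α : Type} (xs : List α) (c : α) (s : Int) :
    PySem.List.enumerate (xs ++ [c]) s = PySem.List.enumerate xs s ++ [((s + xs.length : Int), c)] := by
  induction xs generalizing s with
  | nil => simp [PySem.List.enumerate]
  | cons x t ih => simp [PySem.List.enumerate_cons, ih (s+1)]; ring_nf

theorem pvGrpAppend (ys : List String) (c : String) :
    pvGrp (ys ++ [c]) = (pvGrp ys).modify c [] (fun l => l ++ [(ys.length : Int)]) := by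
  unfold pvGrp
  rw [pvEnumAppend, List.foldl_append]
  simp

theorem pvGrpGetD (ys : List String) (c : String) :
    (pvGrp ys).getD c [] = pvPos ys c := by
  unfold pvGrp pvPos
  calc (((PySem.List.enumerate ys 0)).foldl (fun d ic => d.modify ic.2 [] (fun l => l ++ [ic.1])) PySem.Dict.empty).getD c []
      = (((PySem.List.enumerate ys 0).map Prod.swap).foldl (fun d p => d.modify p.1 [] (fun l => l ++ [p.2])) PySem.Dict.empty).getD c [] := by
        rw [List.foldl_map]
        rfl
    _ = ((PySem.List.enumerate ys 0).filter (fun ic => ic.2 == c)).map (·.1) := by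
        rw [PySem.Dict.getD_foldl_modify_append]
        simp [PySem.Dict.getD_of_not_contains, List.filter_map, Function.comp_def]

theorem pvGrpKeysNodup (ys : List String) : (pvGrp ys).keys.Nodup :=
  PySem.Dict.nodup_keys_foldl_modify_key (PySem.List.enumerate ys 0) (fun ic => ic.2) []
    (fun _ ic => fun l => l ++ [ic.1]) PySem.Dict.empty (by decide)

theorem pvGrpContains (ys : List String) (c : String) :
    (pvGrp ys).contains c = true ↔ c ∈ ys := by
  rw [PySem.Dict.contains_iff_mem_keys]
  unfold pvGrp
  rw [PySem.Dict.keys_foldl_modify_key (PySem.List.enumerate ys 0) (fun ic => ic.2) []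
    (fun _ ic => fun l => l ++ [ic.1]) PySem.Dict.empty]
  rw [PySem.List.map_snd_enumerate]
  show c ∈ PySem.Set.update [] ys ↔ c ∈ ys
  rw [show PySem.Set.update ([] : List String) ys = PySem.Set.ofList ys from rfl]
  exact PySem.Set.mem_ofList ys c

theorem pvPosGen (c : String) (ys : List String) (s : Int) :
    (((PySem.List.enumerate ys s).filter (fun ic => ic.2 == c)).map (·.1)).length = ys.count c
    ∧ ∀ i ∈ ((PySem.List.enumerate ys s).filter (fun ic => ic.2 == c)).map (·.1), s ≤ i ∧ i < s + ys.length := by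
  induction ys generalizing s with
  | nil => simp [PySem.List.enumerate]
  | cons y t ih =>
    obtain ⟨ihl, ihb⟩ := ih (s + 1)
    rw [PySem.List.enumerate_cons]
    by_cases h : y = c
    · subst h
      refine ⟨?_, ?_⟩
      · simp only [List.filter_cons, beq_self_eq_true, if_pos, List.map_cons, List.length_cons, ihl]
        simp [List.count_cons_self]
      · intro i hi
        simp only [List.filter_cons, beq_self_eq_true, if_pos, List.map_cons, List.mem_cons] at hi
        rcases hi with rfl | hi
        · simp only [List.length_cons]; push_cast; omega
        · have := ihb i hi; simp only [List.length_cons]; push_cast; omega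
    · have hb : (y == c) = false := beq_eq_false_iff_ne.mpr h
      refine ⟨?_, ?_⟩
      · have hb' : (c == y) = false := beq_eq_false_iff_ne.mpr (Ne.symm h)
        simpa [List.filter_cons, hb, List.count_cons, hb'] using ihl
      · intro i hi
        simp only [List.filter_cons, hb, Bool.false_eq_true] at hi
        have := ihb i hi; simp only [List.length_cons]; push_cast; omega

theorem pvPosLen (ys : List String) (c : String) : (pvPos ys c).length = ys.count c :=
  (pvPosGen c ys 0).1

theorem pvPosBounds (ys : List String) (c : String) :
    ∀ i ∈ pvPos ys c, 0 ≤ i ∧ i < (ys.length : Int) := by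
  intro i hi
  have := (pvPosGen c ys 0).2 i hi
  omega

theorem pvSetDComm (o : List String) (i j : Int) (v w : String)
    (hi : 0 ≤ i) (hj : 0 ≤ j) (hne : i ≠ j) :
    PySem.List.pySetD (PySem.List.pySetD o j v) i w
      = PySem.List.pySetD (PySem.List.pySetD o i w) j v := by
  rw [PySem.List.pySetD_of_nonneg _ _ hi, PySem.List.pySetD_of_nonneg _ _ hj,
      PySem.List.pySetD_of_nonneg _ _ hj, PySem.List.pySetD_of_nonneg _ _ hi]
  exact List.set_comm _ _ (by omega)

theorem pvInnerSetComm (idxs : List Int) (name : String) (r : Int) (o : List String) (j : Int) (v : String)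
    (h : ∀ i ∈ idxs, 0 ≤ i ∧ i ≠ j) (hj : 0 ≤ j) :
    (PySem.List.enumerate idxs r).foldl (fun o ri => PySem.List.pySetD o ri.2 (pvVal name ri.1))
        (PySem.List.pySetD o j v)
      = PySem.List.pySetD
          ((PySem.List.enumerate idxs r).foldl (fun o ri => PySem.List.pySetD o ri.2 (pvVal name ri.1)) o)
          j v := by
  induction idxs generalizing r o with
  | nil => simp [PySem.List.enumerate]
  | cons i t ih =>
    rw [PySem.List.enumerate_cons]
    simp only [List.foldl_cons]
    obtain ⟨hi0, hij⟩ := h i (by simp)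
    rw [pvSetDComm o i j v (pvVal name r) hi0 hj hij]
    exact ih (r + 1) _ (fun i' hi' => h i' (by simp [hi']))

theorem pvFillGSetComm (kv : String × List Int) (o : List String) (j : Int) (v : String)
    (h : ∀ i ∈ kv.2, 0 ≤ i ∧ i ≠ j) (hj : 0 ≤ j) :
    pvFillG (PySem.List.pySetD o j v) kv = PySem.List.pySetD (pvFillG o kv) j v :=
  pvInnerSetComm kv.2 kv.1 0 o j v h hj

theorem pvFillSetComm (items : List (String × List Int)) (o : List String) (j : Int) (v : String)
    (h : ∀ kv ∈ items, ∀ i ∈ kv.2, 0 ≤ i ∧ i ≠ j) (hj : 0 ≤ j) :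
    pvFill items (PySem.List.pySetD o j v) = PySem.List.pySetD (pvFill items o) j v := by
  induction items generalizing o with
  | nil => simp [pvFill]
  | cons kv t ih =>
    simp only [pvFill, List.foldl_cons] at *
    rw [pvFillGSetComm kv o j v (h kv (by simp)) hj, ih _ (fun kv' hm => h kv' (by simp [hm]))]

theorem pvFillGSnoc (o : List String) (name : String) (old : List Int) (i : Int) :
    pvFillG o (name, old ++ [i])
      = PySem.List.pySetD (pvFillG o (name, old)) i (pvVal name old.length) := by
  unfold pvFillG
  rw [show (name, old ++ [i]).2 = old ++ [i] from rfl, pvEnumAppend, List.foldl_append]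
  simp

theorem pvRenderLen (p l : List String) : (pvRender p l).length = l.length := by
  induction l generalizing p with
  | nil => simp [pvRender]
  | cons c t ih => simp [pvRender, ih]

theorem pvRenderSnoc (l p : List String) (c : String) :
    pvRender p (l ++ [c]) = pvRender p l ++
      [if (p ++ l).count c = 0 then c else c ++ "__" ++ PySem.Int.toStr ((p ++ l).count c : Int)] := by
  induction l generalizing p with
  | nil => simp [pvRender]
  | cons x t ih => simp [pvRender, ih (p ++ [x])]

theorem pvValNat (c : String) (k : Nat) :
    pvVal c (k : Int) = if k = 0 then c else c ++ "__" ++ PySem.Int.toStr (k : Int) := by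
  unfold pvVal
  by_cases h : k = 0 <;> simp [h]

theorem pvMapUpd (c : String) (v : List Int) (L : List (String × List Int))
    (hL : ∀ p ∈ L, (p.1 == c) = false) :
    L.map (fun p => if (p.1 == c) = true then (c, v) else p) = L := by
  induction L with
  | nil => rfl
  | cons p t ih =>
    rw [List.map_cons, if_neg (by simp [hL p (by simp)]), ih (fun q hq => hL q (by simp [hq]))]

-- one snoc step of phase 1, pushed through phase 2: a single positional write
theorem pvFillModify (ys : List String) (c : String) (o : List String) :
    pvFill ((pvGrp ys).modify c [] (fun l => l ++ [(ys.length : Int)])).items o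
      = PySem.List.pySetD (pvFill (pvGrp ys).items o) (ys.length : Int) (pvVal c (ys.count c : Int)) := by
  have hnd := pvGrpKeysNodup ys
  rw [show (pvGrp ys).modify c [] (fun l => l ++ [(ys.length : Int)])
        = (pvGrp ys).insert c ((pvGrp ys).getD c [] ++ [(ys.length : Int)]) from rfl]
  cases hcon : (pvGrp ys).contains c
  · -- c not yet a key: the entry is appended
    have hg : (pvGrp ys).getD c [] = [] := PySem.Dict.getD_of_not_contains _ _ hcon
    have hc0 : ys.count c = 0 := by
      rw [List.count_eq_zero]
      intro hmem
      rw [(pvGrpContains ys c).mpr hmem] at hcon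
      cases hcon
    rw [PySem.Dict.items_insert_of_not_contains _ _ hcon, hg]
    unfold pvFill
    rw [List.foldl_append]
    simp only [List.foldl_cons, List.foldl_nil]
    rw [show ([] : List Int) ++ [(ys.length : Int)] = [] ++ [(ys.length : Int)] from rfl,
        pvFillGSnoc _ c [] (ys.length : Int)]
    rw [hc0]
    rfl
  · -- c already a key: its entry is updated in place
    have hkeys : c ∈ (pvGrp ys).keys := (PySem.Dict.contains_iff_mem_keys _ c).mp hcon
    have hpos : (pvGrp ys).getD c [] = pvPos ys c := pvGrpGetD ys c
    obtain ⟨old, hold⟩ : ∃ old, (c, old) ∈ (pvGrp ys).items := by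
      rw [show (pvGrp ys).keys = (pvGrp ys).items.map (·.1) from rfl] at hkeys
      obtain ⟨p, hp, hp1⟩ := List.mem_map.mp hkeys
      exact ⟨p.2, by rwa [show (c, p.2) = p from by rw [← hp1]]⟩
    have hgold : (pvGrp ys).getD c [] = old := PySem.Dict.getD_of_mem_items _ hold hnd []
    obtain ⟨L1, L2, hsplit⟩ := List.append_of_mem hold
    have hndk : ((pvGrp ys).items.map (·.1)).Nodup := hnd
    rw [hsplit] at hndk
    simp only [List.map_append, List.map_cons, List.nodup_append, List.nodup_cons] at hndk
    have hL1 : ∀ p ∈ L1, (p.1 == c) = false := by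
      intro p hp
      refine beq_eq_false_iff_ne.mpr (fun he => ?_)
      exact hndk.2.2 (p.1) (List.mem_map_of_mem hp) c (by simp) he
    have hL2 : ∀ p ∈ L2, (p.1 == c) = false := by
      intro p hp
      refine beq_eq_false_iff_ne.mpr (fun he => ?_)
      exact hndk.2.1.1 (by rw [← he]; exact List.mem_map_of_mem hp)
    rw [PySem.Dict.items_insert_of_contains _ _ hcon, hsplit]
    rw [List.map_append, List.map_cons]
    rw [pvMapUpd c _ L1 hL1, pvMapUpd c _ L2 hL2]
    rw [show (if ((c, old).1 == c) = true then (c, (pvGrp ys).getD c [] ++ [(ys.length : Int)]) else (c, old))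
          = (c, old ++ [(ys.length : Int)]) from by rw [if_pos (by simp), hgold]]
    unfold pvFill
    rw [List.foldl_append, List.foldl_append]
    simp only [List.foldl_cons]
    rw [show pvFillG (List.foldl pvFillG o L1) (c, old ++ [(ys.length : Int)])
          = PySem.List.pySetD (pvFillG (List.foldl pvFillG o L1) (c, old)) (ys.length : Int) (pvVal c old.length)
        from pvFillGSnoc _ c old _]
    rw [show (List.foldl pvFillG (PySem.List.pySetD (pvFillG (List.foldl pvFillG o L1) (c, old)) (ys.length : Int) (pvVal c old.length)) L2)
          = PySem.List.pySetD (List.foldl pvFillG (pvFillG (List.foldl pvFillG o L1) (c, old)) L2) (ys.length : Int) (pvVal c old.length)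
        from pvFillSetComm L2 _ _ _ ?_ (by positivity)]
    · have : old.length = ys.count c := by rw [← hgold, hpos]; exact pvPosLen ys c
      rw [this]
    · intro kv hkv i hi
      have hkvmem : kv ∈ (pvGrp ys).items := by rw [hsplit]; simp [hkv]
      have : (pvGrp ys).getD kv.1 [] = kv.2 := PySem.Dict.getD_of_mem_items _ (by exact hkvmem) hnd []
      have hb := pvPosBounds ys kv.1 i (by rw [← pvGrpGetD, this]; exact hi)
      exact ⟨hb.1, by omega⟩

-- main B-side induction: the grouped fill computes pvRender
theorem pvMain (ys : List String) (m : Nat) (hm : ys.length ≤ m) :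
    pvFill (pvGrp ys).items (List.replicate m "") = pvRender [] ys ++ List.replicate (m - ys.length) "" := by
  induction ys using List.reverseRecOn generalizing m with
  | nil => simp [pvGrp, pvFill, PySem.List.enumerate, pvRender]; rfl
  | append_singleton ys c ih =>
    rw [pvGrpAppend, pvFillModify, ih m (by simp at hm; omega)]
    rw [PySem.List.pySetD_of_nonneg _ _ (by positivity), Int.toNat_natCast]
    have hlen : (pvRender [] ys).length = ys.length := pvRenderLen [] ys
    rw [List.set_append_right _ _ (by omega), hlen, Nat.sub_self]
    have hrep : List.replicate (m - ys.length) "" = "" :: List.replicate (m - (ys.length + 1)) "" := by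
      rw [← List.replicate_succ]
      congr 1
      simp at hm
      omega
    rw [hrep]
    simp only [List.set_cons_zero]
    rw [pvRenderSnoc, pvValNat]
    simp

-- ===== VERDICT (by name: the statement is the Claim_ definition above) =====
theorem dedupe_columns_py_spec : Claim_equal_dedupe_columns_py := by
  intro cols _
  unfold Spec_dedupe_columns_py dedupe_columns_py
  rw [pvA_loop cols [] PySem.Dict.empty [] (by intro c; simp [PySem.Dict.empty, PySem.Dict.get?]),
      pvAlt_eq_fill, pvMain cols cols.length (le_refl _)]
  simp
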